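-- pv_equiv track=rewrite | github.com/ubitux/Game2Text | util.py | remove_repeat_phrases
-- ===== SOURCE A (Python) =====
-- def remove_repeat_phrases(s):
--     prefix_array=[]
--     for i in range(len(s)):
--         prefix_array.append(s[:i])
--
--     #stop at 1st element to avoid checking for the ' ' char
--     for i in prefix_array[:1:-1]:
--         if s.count(i) > 1 :
--             #find where the next repetition starts
--             offset = s[len(i):].find(i)
--
--             return s[:len(i)+offset]
--             break
--
--     return s
-- ===== SOURCE B (Python) =====
-- def remove_repeat_phrases(s):
--     n = len(s)
--     # lcp[j] = length of the longest common prefix of s and s[j:], one scan per j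
--     lcp = [0] * n
--     for j in range(1, n):
--         k = 0
--         while j + k < n and s[k] == s[j + k]:
--             k += 1
--         lcp[j] = k
--     # longest prefix length L that re-occurs at some position j >= L
--     best = 0
--     for j in range(1, n):
--         best = max(best, min(lcp[j], j))
--     if best >= 2:
--         for j in range(best, n):
--             if lcp[j] >= best:
--                 return s[:j]
--     return s
-- ===== Notes on version B (the rewrite author's own statement) =====
-- stated objective: faster
-- what changed: A tests every prefix length from n-1 down to 2 with a fresh s.count scan and then a find; B computes one longest-common-prefix value per start position (with early exit), reads the longest re-occurring prefix length off as max(min(lcp(j), j)) and the cut point as the first j with lcp(j) >= best.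
import Mathlib
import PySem

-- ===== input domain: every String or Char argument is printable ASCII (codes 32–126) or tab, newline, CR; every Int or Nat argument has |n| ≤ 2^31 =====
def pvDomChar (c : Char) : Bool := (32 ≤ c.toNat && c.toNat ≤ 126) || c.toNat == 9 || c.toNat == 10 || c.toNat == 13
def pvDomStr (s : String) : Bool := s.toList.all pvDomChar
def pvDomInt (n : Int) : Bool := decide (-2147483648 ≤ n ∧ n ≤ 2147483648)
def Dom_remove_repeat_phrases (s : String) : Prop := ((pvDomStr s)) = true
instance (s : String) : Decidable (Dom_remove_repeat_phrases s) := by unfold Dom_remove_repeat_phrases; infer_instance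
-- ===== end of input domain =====

-- B replaces A's O(n^3) scan (one str.count + find over the whole string per candidate prefix
-- length) by one longest-common-prefix value per start position, from which the longest
-- re-occurring prefix and its re-occurrence point are read off directly.

-- ===== PORT A =====
-- the early-returning 'for i in prefix_array[:1:-1]' loop: first prefix with count > 1 wins
def pvLoopA (cs : List Char) : List (List Char) → Option (List Char)
  | [] => none
  | p :: rest =>
    if 1 < PySem.Chars.count cs p then
      -- offset = s[len(i):].find(i); return s[:len(i)+offset]
      some (PySem.Chars.slice cs none
        (some ((p.length : Int) + PySem.Chars.find (PySem.Chars.slice cs (some (p.length : Int)) none) p)))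
    else pvLoopA cs rest

def remove_repeat_phrases (s : String) : String :=
  let cs := s.toList
  -- prefix_array built by the append loop over range(len(s))
  let prefix_array := (PySem.List.pyRange 0 (cs.length : Int) 1).foldl
      (fun acc i => acc ++ [PySem.Chars.slice cs none (some i)]) []
  -- prefix_array[:1:-1]  (step -1, so slice? never returns none; getD [] is unreachable)
  let rev := (PySem.List.slice? prefix_array none (some 1) (-1)).getD []
  match pvLoopA cs rev with
  | some r => String.ofList r
  | none => s

-- ===== PORT B =====
-- k = 0; while j + k < n and s[k] == s[j+k]: k += 1; return k
def pvLcp (cs : List Char) (j k : Nat) : Nat :=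
  if h : j + k < cs.length ∧ cs[k]? = cs[j + k]? then pvLcp cs j (k + 1) else k
termination_by cs.length - (j + k)
decreasing_by omega

-- best = 0; for j in range(1, n): best = max(best, min(lcp(j), j))
def pvBest (cs : List Char) : Nat :=
  (PySem.List.pyRange 1 (cs.length : Int) 1).foldl
    (fun b j => max b (min (pvLcp cs j.toNat 0) j.toNat)) 0

-- j = best; while j < n and lcp(j) < best: j += 1
def pvFindJ (cs : List Char) (best j : Nat) : Nat :=
  if j < cs.length then (if pvLcp cs j 0 < best then pvFindJ cs best (j + 1) else j) else j
termination_by cs.length - j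
decreasing_by omega

def remove_repeat_phrases_alt (s : String) : String :=
  let cs := s.toList
  let best := pvBest cs
  if 2 ≤ best then
    String.ofList (PySem.Chars.slice cs none (some ((pvFindJ cs best best : Nat) : Int)))
  else s

-- ===== PRECONDITION & SPEC =====
def Spec_remove_repeat_phrases (s : String) (out : String) : Prop := out = remove_repeat_phrases_alt s
instance (s : String) (out : String) : Decidable (Spec_remove_repeat_phrases s out) := by unfold Spec_remove_repeat_phrases; infer_instance

-- ===== CLAIM (what is proved, stated in full; the proofs are below) =====
def Claim_equal_remove_repeat_phrases : Prop := ∀ (s : String), Dom_remove_repeat_phrases s → Spec_remove_repeat_phrases s (remove_repeat_phrases s)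

-- ===== LEMMAS AND PROOFS =====

theorem pv_go_mono (sub : List Char) (fuel : Nat) : ∀ (l : List Char) (acc : Nat),
    acc ≤ PySem.Chars.count.go sub fuel l acc := by
  induction fuel with
  | zero => intro l acc; rw [PySem.Chars.count.go.eq_def]
  | succ f ih =>
    intro l acc
    rw [PySem.Chars.count.go.eq_def]
    cases l with
    | nil => simp
    | cons h t =>
      simp only []
      split
      · exact le_trans (Nat.le_succ acc) (ih _ _)
      · exact ih _ _

theorem pv_go_occ (sub : List Char) (hsub : sub ≠ []) (fuel : Nat) :
    ∀ (l : List Char) (acc : Nat), l.length ≤ fuel →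
    (sub <:+: l ↔ acc < PySem.Chars.count.go sub fuel l acc) := by
  induction fuel with
  | zero =>
    intro l acc hf
    have : l = [] := by cases l <;> simp_all
    subst this
    rw [PySem.Chars.count.go.eq_def]
    simp [List.infix_nil, hsub]
  | succ f ih =>
    intro l acc hf
    rw [PySem.Chars.count.go.eq_def]
    cases l with
    | nil => simp [List.infix_nil, hsub]
    | cons h t =>
      simp only []
      split
      · rename_i hpre
        constructor
        · intro _
          exact lt_of_lt_of_le (Nat.lt_succ_self acc) (pv_go_mono _ _ _ _)
        · intro _
          exact (List.isPrefixOf_iff_prefix.mp hpre).isInfix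
      · rename_i hpre
        have hnp : ¬ sub <+: (h :: t) := fun hc => hpre (List.isPrefixOf_iff_prefix.mpr hc)
        rw [List.infix_cons_iff]
        simp only [hnp, false_or]
        exact ih t acc (by simpa using Nat.le_of_succ_le_succ hf)

theorem pv_count_gt_one (cs p : List Char) (hp : p ≠ []) (hpre : p <+: cs) :
    1 < PySem.Chars.count cs p ↔ p <:+: cs.drop p.length := by
  unfold PySem.Chars.count
  have hpe : p.isEmpty = false := by cases p <;> simp_all
  rw [hpe]
  simp only [Bool.false_eq_true, if_false]
  cases cs with
  | nil => simp_all
  | cons c t =>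
    rw [PySem.Chars.count.go.eq_def]
    simp only [List.length_cons]
    have hpre' : p.isPrefixOf (c :: t) = true := List.isPrefixOf_iff_prefix.mpr hpre
    rw [if_pos hpre']
    have hlen : (List.drop p.length (c :: t)).length ≤ t.length := by
      have : 1 ≤ p.length := by cases p <;> simp_all
      simp [List.length_drop]; omega
    exact (pv_go_occ p hp t.length _ 1 hlen).symm

theorem pvLcp_add_le (cs : List Char) (j k : Nat) (h : j + k ≤ cs.length) :
    j + pvLcp cs j k ≤ cs.length := by
  fun_induction pvLcp cs j k with
  | case1 k h ih => exact ih (by omega)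
  | case2 k hstop => exact h

theorem pvLcp_match (cs : List Char) (j k i : Nat) (h1 : k ≤ i) (h2 : i < pvLcp cs j k) :
    cs[i]? = cs[j + i]? := by
  fun_induction pvLcp cs j k with
  | case1 k h ih =>
    rcases Nat.eq_or_lt_of_le h1 with rfl | hlt
    · exact h.2
    · exact ih hlt h2
  | case2 k hstop => omega

theorem pvLcp_stop (cs : List Char) (j k : Nat) :
    ¬ (j + pvLcp cs j k < cs.length ∧ cs[pvLcp cs j k]? = cs[j + pvLcp cs j k]?) := by
  fun_induction pvLcp cs j k with
  | case1 k h ih => exact ih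
  | case2 k hstop => exact hstop

-- prefix-of-drop characterised by positions
theorem pv_prefix_drop_iff (cs : List Char) (L j : Nat) (hL : L ≤ cs.length) (hj : j ≤ cs.length) :
    cs.take L <+: cs.drop j ↔ j + L ≤ cs.length ∧ ∀ i < L, cs[i]? = cs[j + i]? := by
  have hlen : (cs.take L).length = L := by simp [hL]
  constructor
  · intro h
    have hle := h.length_le
    rw [hlen, List.length_drop] at hle
    refine ⟨by omega, fun i hi => ?_⟩
    have := List.prefix_iff_getElem?.mp h i (by omega)
    rw [List.getElem?_drop] at this
    rw [this, List.getElem_take, List.getElem?_eq_getElem (by omega)]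
  · rintro ⟨hjl, hmatch⟩
    rw [List.prefix_iff_getElem?]
    intro i hi
    rw [hlen] at hi
    rw [List.getElem?_drop, ← hmatch i hi, List.getElem_take,
      List.getElem?_eq_getElem (by omega)]

-- occurrence at j ↔ lcp at j at least L  (for positions j < n and 1 ≤ L ≤ n)
theorem pv_occ_iff_lcp (cs : List Char) (L j : Nat) (hLn : L ≤ cs.length)
    (hj : j < cs.length) :
    cs.take L <+: cs.drop j ↔ L ≤ pvLcp cs j 0 := by
  rw [pv_prefix_drop_iff cs L j hLn (le_of_lt hj)]
  constructor
  · rintro ⟨hjl, hmatch⟩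
    by_contra hlt
    push Not at hlt
    exact pvLcp_stop cs j 0 ⟨by omega, hmatch _ hlt⟩
  · intro hle
    have hadd := pvLcp_add_le cs j 0 (by omega)
    exact ⟨by omega, fun i hi => pvLcp_match cs j 0 i (Nat.zero_le i) (by omega)⟩

-- generic foldl-max facts
theorem pv_foldl_max_le (f : Nat → Nat) (l : List Nat) : ∀ (a c : Nat), a ≤ c →
    (∀ j ∈ l, f j ≤ c) → l.foldl (fun b j => max b (f j)) a ≤ c := by
  induction l with
  | nil => intro a c ha _; simpa using ha
  | cons x xs ih =>
    intro a c ha hl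
    simp only [List.foldl_cons]
    exact ih _ c (max_le ha (hl x List.mem_cons_self)) (fun j hj => hl j (List.mem_cons_of_mem x hj))

theorem pv_foldl_max_base (f : Nat → Nat) (l : List Nat) : ∀ (a : Nat),
    a ≤ l.foldl (fun b j => max b (f j)) a := by
  induction l with
  | nil => intro a; simp
  | cons x xs ih =>
    intro a
    simp only [List.foldl_cons]
    exact le_trans (le_max_left a (f x)) (ih _)

theorem pv_foldl_max_mem (f : Nat → Nat) (l : List Nat) : ∀ (a : Nat) (j : Nat), j ∈ l →
    f j ≤ l.foldl (fun b j => max b (f j)) a := by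
  induction l with
  | nil => intro a j hj; simp at hj
  | cons x xs ih =>
    intro a j hj
    simp only [List.foldl_cons]
    rcases List.mem_cons.mp hj with rfl | hj
    · exact le_trans (le_max_right a (f j)) (pv_foldl_max_base f xs _)
    · exact ih _ j hj

theorem pv_foldl_max_cases (f : Nat → Nat) (l : List Nat) : ∀ (a : Nat),
    l.foldl (fun b j => max b (f j)) a = a ∨ ∃ j ∈ l, l.foldl (fun b j => max b (f j)) a = f j := by
  induction l with
  | nil => intro a; left; simp
  | cons x xs ih =>
    intro a
    simp only [List.foldl_cons]
    rcases ih (max a (f x)) with h | ⟨j, hj, h⟩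
    · rw [h]
      rcases max_choice a (f x) with h' | h'
      · left; exact h'
      · right; exact ⟨x, List.mem_cons_self, h'⟩
    · right; exact ⟨j, List.mem_cons_of_mem x hj, h⟩

-- pvBest as a fold over the Nat range
theorem pvBest_eq (cs : List Char) :
    pvBest cs = (List.range' 1 (cs.length - 1)).foldl
      (fun b j => max b (min (pvLcp cs j 0) j)) 0 := by
  unfold pvBest
  rw [PySem.List.pyRange_of_pos 1 (cs.length : Int) (by norm_num : (0:Int) < 1)]
  have hc : (if (1:Int) < (cs.length : Int) then
      (((cs.length : Int) - 1 + 1 - 1) / 1).toNat else 0) = cs.length - 1 := by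
    simp only [Int.ediv_one]
    split <;> omega
  rw [hc, List.range'_eq_map_range, List.foldl_map, List.foldl_map]
  congr 1
  funext b k
  have ht : ((1:Int) + 1 * (k : Int)).toNat = 1 + k := by omega
  rw [ht]

theorem pvBest_le (cs : List Char) : pvBest cs ≤ cs.length - 1 := by
  rw [pvBest_eq]
  refine pv_foldl_max_le _ _ 0 _ (Nat.zero_le _) (fun j hj => ?_)
  rw [List.mem_range'_1] at hj
  omega

theorem pvBest_ge (cs : List Char) (j : Nat) (h1 : 1 ≤ j) (hj : j < cs.length) :
    min (pvLcp cs j 0) j ≤ pvBest cs := by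
  rw [pvBest_eq]
  exact pv_foldl_max_mem (fun j => min (pvLcp cs j 0) j) _ 0 j
    (by rw [List.mem_range'_1]; omega)

theorem pvBest_attained (cs : List Char) (h : 1 ≤ pvBest cs) :
    ∃ j, 1 ≤ j ∧ j < cs.length ∧ pvBest cs = min (pvLcp cs j 0) j := by
  have := pvBest_eq cs
  rcases pv_foldl_max_cases (fun j => min (pvLcp cs j 0) j) (List.range' 1 (cs.length - 1)) 0 with
    h0 | ⟨j, hj, hv⟩
  · rw [← this] at h0; omega
  · rw [List.mem_range'_1] at hj
    exact ⟨j, hj.1, by omega, by rw [this]; exact hv⟩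

-- A's loop test characterised: for 2 ≤ L ≤ n-1, count(take L) > 1 ↔ L ≤ pvBest
theorem pv_P_iff (cs : List Char) (L : Nat) (h2 : 2 ≤ L) (hL : L + 1 ≤ cs.length) :
    1 < PySem.Chars.count cs (cs.take L) ↔ L ≤ pvBest cs := by
  have hn : L ≤ cs.length := by omega
  have hplen : (cs.take L).length = L := by simp [hn]
  have hpne : cs.take L ≠ [] := by
    intro hc
    have := congrArg List.length hc
    rw [hplen] at this
    simp at this
    omega
  rw [pv_count_gt_one cs _ hpne (List.take_prefix L cs), hplen]
  constructor
  · intro hocc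
    obtain ⟨i, hi⟩ := (PySem.Chars.exists_prefix_drop_iff_isIn _ _).mpr
      ((PySem.Chars.isIn_iff_infix _ _).mpr hocc)
    rw [List.drop_drop] at hi
    have hj : L + i < cs.length := by
      by_contra hge
      push Not at hge
      rw [List.drop_eq_nil_iff.mpr hge] at hi
      exact hpne (List.prefix_nil.mp hi)
    have hz := (pv_occ_iff_lcp cs L (L + i) hn hj).mp hi
    calc L ≤ min (pvLcp cs (L + i) 0) (L + i) := le_min hz (by omega)
      _ ≤ pvBest cs := pvBest_ge cs (L + i) (by omega) hj
  · intro hbest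
    obtain ⟨j0, hj1, hjn, hjv⟩ := pvBest_attained cs (by omega)
    have h1 : pvBest cs ≤ pvLcp cs j0 0 := hjv ▸ min_le_left _ _
    have h2 : pvBest cs ≤ j0 := hjv ▸ min_le_right _ _
    have hocc := (pv_occ_iff_lcp cs L j0 hn hjn).mpr (by omega)
    rw [(PySem.Chars.isIn_iff_infix _ _).symm,
      ← PySem.Chars.exists_prefix_drop_iff_isIn]
    refine ⟨j0 - L, ?_⟩
    rw [List.drop_drop]
    have : L + (j0 - L) = j0 := by omega
    rw [this]
    exact hocc

-- pvFindJ finds the least j' ≥ j with lcp ≥ best, when one exists below n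
theorem pvFindJ_spec (cs : List Char) (best j : Nat)
    (h : ∃ j0, j ≤ j0 ∧ j0 < cs.length ∧ best ≤ pvLcp cs j0 0) :
    j ≤ pvFindJ cs best j ∧ best ≤ pvLcp cs (pvFindJ cs best j) 0 ∧
      ∀ i, j ≤ i → i < pvFindJ cs best j → pvLcp cs i 0 < best := by
  revert h
  fun_induction pvFindJ cs best j with
  | case1 j hjn hlt ih =>
    intro h
    obtain ⟨j0, hle, hlt0, hz⟩ := h
    have hne : j0 ≠ j := fun hc => by rw [hc] at hz; omega
    obtain ⟨ih1, ih2, ih3⟩ := ih ⟨j0, by omega, hlt0, hz⟩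
    refine ⟨by omega, ih2, fun i h1 h2 => ?_⟩
    rcases Nat.eq_or_lt_of_le h1 with rfl | hi
    · exact hlt
    · exact ih3 i (by omega) h2
  | case2 j hjn hge =>
    intro _
    exact ⟨le_refl j, by omega, fun i h1 h2 => by omega⟩
  | case3 j hjn =>
    intro h
    obtain ⟨j0, hle, hlt0, _⟩ := h
    omega

-- the reversed slice
theorem pv_slice_rev {α : Type} (xs : List α) :
    PySem.List.slice? xs none (some 1) (-1) = some ((xs.drop 2).reverse) := by
  unfold PySem.List.slice? PySem.List.sliceIndices
  norm_num
  by_cases h : 2 < xs.length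
  · rw [if_pos h]
    have hm : ((xs.length : Int) - 1 - min 1 ((xs.length : Int) - 1)).toNat = xs.length - 2 := by
      omega
    rw [hm]
    cases xs with
    | nil => simp at h
    | cons d t =>
      have hcongr := List.filterMap_congr
          (l := List.range ((d :: t).length - 2))
          (f := fun (x : Nat) => (d :: t)[(((d :: t).length : Int) - 1 + -(x : Int)).toNat]?)
          (g := some ∘ fun k => (d :: t).getD ((d :: t).length - 1 - k) d)
          (fun k hk => by
        rw [List.mem_range] at hk
        show (d :: t)[(((d :: t).length : Int) - 1 + -(k : Int)).toNat]? =
          some ((d :: t).getD ((d :: t).length - 1 - k) d)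
        have h1 : (((d :: t).length : Int) - 1 + -(k : Int)).toNat = (d :: t).length - 1 - k := by
          omega
        have h2 : (d :: t).length - 1 - k < (d :: t).length := by omega
        rw [h1, List.getElem?_eq_getElem h2]
        rw [List.getD_eq_getElem _ _ h2])
      rw [hcongr, List.filterMap_eq_map]
      refine List.ext_getElem ?_ (fun i h1 h2 => ?_)
      · simp
      · simp only [List.getElem_map, List.getElem_range, List.getElem_reverse, List.getElem_drop]
        have hlen : i < (d :: t).length - 2 := by simpa using h1
        have hidx : (d :: t).length - 1 - i < (d :: t).length := by omega
        rw [List.getD_eq_getElem _ _ hidx]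
        congr 1
        simp only [List.length_reverse, List.length_drop] at h2 ⊢
        omega
  · rw [if_neg h]
    have hnil : xs.drop 2 = [] := List.drop_eq_nil_iff.mpr (by omega)
    simp [hnil]

-- prefix_array
theorem pv_prefix_array (cs : List Char) :
    (PySem.List.pyRange 0 (cs.length : Int) 1).foldl
      (fun acc i => acc ++ [PySem.Chars.slice cs none (some i)]) []
    = (List.range cs.length).map (fun i => cs.take i) := by
  rw [PySem.List.foldl_append_singleton_eq_map]
  rw [PySem.List.pyRange_of_pos 0 (cs.length : Int) (by norm_num : (0:Int) < 1)]
  have hc : (if (0:Int) < (cs.length : Int) then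
      (((cs.length : Int) - 0 + 1 - 1) / 1).toNat else 0) = cs.length := by
    simp only [Int.ediv_one]
    split <;> omega
  rw [hc, List.map_map, List.nil_append]
  refine List.map_congr_left (fun k hk => ?_)
  show PySem.Chars.slice cs none (some ((0:Int) + 1 * (k : Int))) = cs.take k
  have : (0:Int) + 1 * (k : Int) = (k : Int) := by ring
  rw [this, PySem.Chars.slice_eq_listSlice, PySem.List.slice_to_natCast]

-- the descending scan
theorem pv_scan (cs : List Char) (m : Nat) (hm : pvBest cs ≤ m + 1)
    (hmn : m + 2 ≤ cs.length ∨ m = 0) :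
    pvLoopA cs (((List.range' 2 m).reverse).map (fun L => cs.take L)) =
      if 2 ≤ pvBest cs then
        some (PySem.Chars.slice cs none
          (some ((pvBest cs : Int) +
            PySem.Chars.find (PySem.Chars.slice cs (some (pvBest cs : Int)) none) (cs.take (pvBest cs)))))
      else none := by
  revert hm hmn
  induction m with
  | zero =>
    intro hm hmn
    rw [List.range'_zero, List.reverse_nil, List.map_nil, pvLoopA]
    rw [if_neg (by omega)]
  | succ m ih =>
    intro hm hmn
    have hmn2 : m + 3 ≤ cs.length := by rcases hmn with h' | h' <;> omega
    rw [List.range'_concat, List.reverse_append, List.map_append]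
    simp only [List.reverse_cons, List.reverse_nil, List.nil_append, List.map_cons,
      List.map_nil, List.cons_append, List.nil_append]
    rw [pvLoopA]
    have hlen : (cs.take (2 + 1 * m)).length = 2 + 1 * m := by
      rw [List.length_take]
      omega
    have hP := pv_P_iff cs (2 + 1 * m) (by omega) (by omega)
    by_cases htest : 1 < PySem.Chars.count cs (cs.take (2 + 1 * m))
    · rw [if_pos htest]
      have hbest : pvBest cs = 2 + 1 * m := le_antisymm (by omega) (hP.mp htest)
      rw [if_pos (by omega)]
      rw [hlen, hbest]
    · rw [if_neg htest]
      have hb : pvBest cs ≤ m + 1 := by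
        rcases Nat.lt_or_ge (pvBest cs) (2 + 1 * m) with h | h
        · omega
        · exact absurd (hP.mpr (by omega)) htest
      exact ih hb (Or.inl (by omega))

-- the two return values agree when pvBest ≥ 2
theorem pv_value_eq (cs : List Char) (h : 2 ≤ pvBest cs) :
    PySem.Chars.slice cs none
        (some ((pvBest cs : Int) +
          PySem.Chars.find (PySem.Chars.slice cs (some (pvBest cs : Int)) none) (cs.take (pvBest cs))))
      = PySem.Chars.slice cs none (some ((pvFindJ cs (pvBest cs) (pvBest cs) : Nat) : Int)) := by
  have hbl := pvBest_le cs
  obtain ⟨j0, hj1, hjn, hjv⟩ := pvBest_attained cs (by omega)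
  have hz0 : pvBest cs ≤ pvLcp cs j0 0 := by
    have := min_le_left (pvLcp cs j0 0) j0
    omega
  have hjL : pvBest cs ≤ j0 := by
    have := min_le_right (pvLcp cs j0 0) j0
    omega
  have hLn : pvBest cs < cs.length := by omega
  have hpne : cs.take (pvBest cs) ≠ [] := by
    intro hc
    rcases List.take_eq_nil_iff.mp hc with h0 | h0
    · omega
    · rw [h0] at hjn
      simp at hjn
  rw [PySem.Chars.slice_eq_listSlice cs (some ((pvBest cs : Nat) : Int)) none,
    PySem.List.slice_from_natCast]
  have hocc0 : cs.take (pvBest cs) <+: cs.drop j0 :=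
    (pv_occ_iff_lcp cs (pvBest cs) j0 (by omega) hjn).mpr hz0
  have hinf : cs.take (pvBest cs) <:+: cs.drop (pvBest cs) := by
    rw [← PySem.Chars.isIn_iff_infix, ← PySem.Chars.exists_prefix_drop_iff_isIn]
    refine ⟨j0 - pvBest cs, ?_⟩
    rw [List.drop_drop]
    have heq : pvBest cs + (j0 - pvBest cs) = j0 := by omega
    rw [heq]
    exact hocc0
  have hf0 : 0 ≤ PySem.Chars.find (cs.drop (pvBest cs)) (cs.take (pvBest cs)) :=
    (PySem.Chars.find_nonneg_iff _ _).mpr hinf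
  obtain ⟨hfocc, hfmin⟩ := PySem.Chars.find_spec hf0
  rw [List.drop_drop] at hfocc
  have hfn : pvBest cs + (PySem.Chars.find (cs.drop (pvBest cs)) (cs.take (pvBest cs))).toNat
      < cs.length := by
    by_contra hge
    push Not at hge
    rw [List.drop_eq_nil_iff.mpr hge] at hfocc
    exact hpne (List.prefix_nil.mp hfocc)
  have hzf := (pv_occ_iff_lcp cs (pvBest cs) _ (by omega) hfn).mp hfocc
  obtain ⟨hr1, hr2, hr3⟩ := pvFindJ_spec cs (pvBest cs) (pvBest cs) ⟨j0, hjL, hjn, hz0⟩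
  have hrle : pvFindJ cs (pvBest cs) (pvBest cs)
      ≤ pvBest cs + (PySem.Chars.find (cs.drop (pvBest cs)) (cs.take (pvBest cs))).toNat := by
    by_contra hlt
    push Not at hlt
    have := hr3 _ (by omega) hlt
    omega
  have hrn : pvFindJ cs (pvBest cs) (pvBest cs) < cs.length := by omega
  have hler : pvBest cs + (PySem.Chars.find (cs.drop (pvBest cs)) (cs.take (pvBest cs))).toNat
      ≤ pvFindJ cs (pvBest cs) (pvBest cs) := by
    by_contra hlt
    push Not at hlt
    have hoccr : cs.take (pvBest cs) <+: cs.drop (pvFindJ cs (pvBest cs) (pvBest cs)) :=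
      (pv_occ_iff_lcp cs (pvBest cs) _ (by omega) hrn).mpr hr2
    have hm := hfmin (pvFindJ cs (pvBest cs) (pvBest cs) - pvBest cs) (by omega)
    rw [List.drop_drop] at hm
    have heq : pvBest cs + (pvFindJ cs (pvBest cs) (pvBest cs) - pvBest cs)
        = pvFindJ cs (pvBest cs) (pvBest cs) := by omega
    rw [heq] at hm
    exact hm hoccr
  have heq2 : (pvBest cs : Int)
        + PySem.Chars.find (cs.drop (pvBest cs)) (cs.take (pvBest cs))
      = ((pvFindJ cs (pvBest cs) (pvBest cs) : Nat) : Int) := by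
    omega
  rw [heq2]

theorem pv_drop_range (n m : Nat) : (List.range n).drop m = List.range' m (n - m) := by
  rcases Nat.lt_or_ge m n with h | h
  · rw [List.range_eq_range']
    have h2 : List.range' 0 n = List.range' 0 m ++ List.range' m (n - m) := by
      have h3 := List.range'_append (s := 0) (m := m) (n := n - m) (step := 1)
      simp only [Nat.zero_add, Nat.one_mul] at h3
      have h4 : m + (n - m) = n := by omega
      rw [h4] at h3
      exact h3.symm
    rw [h2, List.drop_left' (by simp)]
  · rw [List.drop_eq_nil_iff.mpr (by simp; omega)]
    have h4 : n - m = 0 := by omega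
    rw [h4, List.range'_zero]

theorem pv_main (s : String) : remove_repeat_phrases s = remove_repeat_phrases_alt s := by
  unfold remove_repeat_phrases remove_repeat_phrases_alt
  dsimp only
  rw [pv_prefix_array, pv_slice_rev]
  simp only [Option.getD_some]
  have hdrop : ((List.range s.toList.length).map (fun i => s.toList.take i)).drop 2
      = (List.range' 2 (s.toList.length - 2)).map (fun i => s.toList.take i) := by
    rw [← List.map_drop, pv_drop_range]
  rw [hdrop, ← List.map_reverse]
  rw [pv_scan s.toList (s.toList.length - 2)
    (by have := pvBest_le s.toList; omega)
    (by rcases Nat.lt_or_ge 2 s.toList.length with h | h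
        · exact Or.inl (by omega)
        · exact Or.inr (by omega))]
  by_cases hb : 2 ≤ pvBest s.toList
  · rw [if_pos hb, if_pos hb]
    exact congrArg String.ofList (pv_value_eq s.toList hb)
  · rw [if_neg hb, if_neg hb]

-- ===== VERDICT (by name: the statement is the Claim_ definition above) =====
theorem remove_repeat_phrases_spec : Claim_equal_remove_repeat_phrases := by
  intro s _
  show _ = _
  exact pv_main s
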